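-- pv_equiv track=rewrite | github.com/Jianqiu-Wang/PythonDataStrucutre | anagram.py | anagram_sol1
-- ===== SOURCE A (Python) =====
-- def anagram_sol1(s1,s2):
--     """ Return if string s2 is simply a rearrangement of string s1
--     """
--     a_list = list(s2)
--
--     pos1 = 0
--     still_ok = True
--
--     while pos1 < len(s1) and still_ok:
--         pos2 = 0
--         found = False
--         while pos2 < len(a_list) and not found:
--             if s1[pos1] == a_list[pos2]:
--                 found = True
--             else:
--                 pos2 = pos2 + 1
--
--         if found:
--             a_list[pos2] = None
--         else:
--             still_ok = False
--
--         pos1 = pos1 + 1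
--
--     return still_ok
-- ===== SOURCE B (Python) =====
-- def anagram_sol1(s1, s2):
--     """Return whether every character of s1 can be matched against a distinct
--     character of s2, by building a character counter of s2 once and decrementing."""
--     counts = {}
--     for c in s2:
--         counts[c] = counts.get(c, 0) + 1
--     for c in s1:
--         n = counts.get(c, 0)
--         if n == 0:
--             return False
--         counts[c] = n - 1
--     return True
-- ===== Notes on version B (the rewrite author's own statement) =====
-- stated objective: faster
-- what changed: Replaces the quadratic scan-and-mark (for each s1 char, linearly rescan a mutable copy of s2 and overwrite the match with None) by a single hash-counter pass over s2 followed by one decrementing pass over s1.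
import Mathlib
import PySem

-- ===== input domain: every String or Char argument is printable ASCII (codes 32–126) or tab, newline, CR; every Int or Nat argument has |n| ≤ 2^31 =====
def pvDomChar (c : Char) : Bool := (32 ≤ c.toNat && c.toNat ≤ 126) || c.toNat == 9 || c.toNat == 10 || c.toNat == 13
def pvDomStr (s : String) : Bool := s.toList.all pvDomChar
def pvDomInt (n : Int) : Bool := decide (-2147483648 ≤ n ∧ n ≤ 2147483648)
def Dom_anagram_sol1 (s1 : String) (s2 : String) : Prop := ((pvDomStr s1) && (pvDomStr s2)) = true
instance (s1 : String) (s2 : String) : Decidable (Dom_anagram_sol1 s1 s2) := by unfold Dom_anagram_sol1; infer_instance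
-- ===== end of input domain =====

-- B replaces A's quadratic scan-and-mark with one counter pass over s2 and one
-- decrementing pass over s1 (asymptotically faster; return value only, A also
-- only mutates its private copy of s2).

-- ===== PORT A =====
-- inner while: scan a_list from the left for the first cell equal to s1's char;
-- `none` cells are the `None` marks (char == None is False in Python)
def agFind (c : Char) : List (Option Char) → Option Nat
  | [] => none
  | x :: xs => if x = some c then some 0 else (agFind c xs).map (· + 1)

-- outer while over s1 with the mutable a_list: mark the found cell None, or stop
def agLoop : List Char → List (Option Char) → Bool
  | [], _ => true
  | c :: rest, a =>
    match agFind c a with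
    | some i => agLoop rest (a.set i none)
    | none => false

def anagram_sol1 (s1 : String) (s2 : String) : Bool :=
  agLoop s1.toList (s2.toList.map (fun c => some c))

-- ===== PORT B =====
-- second pass of Source B: decrement the counter for each char of s1
def bLoop : List Char → PySem.Dict Char Int → Bool
  | [], _ => true
  | c :: rest, d =>
    let n := d.getD c 0
    if n = 0 then false else bLoop rest (d.insert c (n - 1))

def anagram_sol1_alt (s1 : String) (s2 : String) : Bool :=
  bLoop s1.toList
    (s2.toList.foldl (fun d c => d.insert c (d.getD c 0 + 1)) PySem.Dict.empty)

-- ===== PRECONDITION & SPEC =====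
def Spec_anagram_sol1 (s1 : String) (s2 : String) (out : Bool) : Prop := out = anagram_sol1_alt s1 s2
instance (s1 : String) (s2 : String) (out : Bool) : Decidable (Spec_anagram_sol1 s1 s2 out) := by unfold Spec_anagram_sol1; infer_instance

-- ===== CLAIM (what is proved, stated in full; the proofs are below) =====
def Claim_equal_anagram_sol1 : Prop := ∀ (s1 : String) (s2 : String), Dom_anagram_sol1 s1 s2 → Spec_anagram_sol1 s1 s2 (anagram_sol1 s1 s2)

-- ===== LEMMAS AND PROOFS =====

-- the inner scan fails exactly when no live cell holds c
lemma agFind_eq_none {c : Char} {a : List (Option Char)} :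
    agFind c a = none ↔ a.count (some c) = 0 := by
  induction a with
  | nil => simp [agFind]
  | cons x xs ih =>
    by_cases h : x = some c <;>
      simp [agFind, h, ih, Option.map_eq_none_iff]

-- marking the found cell removes exactly one live occurrence of c
lemma agFind_set_count_self {c : Char} {a : List (Option Char)} {i : Nat}
    (h : agFind c a = some i) :
    (a.set i none).count (some c) + 1 = a.count (some c) := by
  induction a generalizing i with
  | nil => simp [agFind] at h
  | cons x xs ih =>
    by_cases hx : x = some c
    · simp only [agFind, if_pos hx] at h
      cases h
      subst hx
      simp
    · simp only [agFind, if_neg hx, Option.map_eq_some_iff] at h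
      obtain ⟨j, hj, rfl⟩ := h
      simp [hx, ih hj]
-- …and leaves the live count of every other character unchanged
lemma agFind_set_count_ne {c c' : Char} {a : List (Option Char)} {i : Nat}
    (h : agFind c a = some i) (hne : c' ≠ c) :
    (a.set i none).count (some c') = a.count (some c') := by
  induction a generalizing i with
  | nil => simp [agFind] at h
  | cons x xs ih =>
    by_cases hx : x = some c
    · simp only [agFind, if_pos hx] at h
      cases h
      subst hx
      simp [Ne.symm hne]
    · simp only [agFind, if_neg hx, Option.map_eq_some_iff] at h
      obtain ⟨j, hj, rfl⟩ := h
      simp [List.count_cons, ih hj]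

-- main invariant: the counter always agrees with the live-cell counts
lemma agLoop_eq_bLoop (l : List Char) (a : List (Option Char)) (d : PySem.Dict Char Int)
    (hinv : ∀ c : Char, d.getD c 0 = (a.count (some c) : Int)) :
    agLoop l a = bLoop l d := by
  induction l generalizing a d with
  | nil => rfl
  | cons c rest ih =>
    simp only [agLoop, bLoop]
    cases hfind : agFind c a with
    | none =>
      have h0 : a.count (some c) = 0 := agFind_eq_none.mp hfind
      simp [hinv c, h0]
    | some i =>
      have hpos : a.count (some c) ≠ 0 := by
        intro h0
        simp [agFind_eq_none.mpr h0] at hfind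
      have hn : d.getD c 0 ≠ 0 := by
        rw [hinv c]; exact_mod_cast hpos
      rw [if_neg hn]
      refine ih _ _ (fun c' => ?_)
      rw [PySem.Dict.getD_insert]
      by_cases hc : c' = c
      · subst hc
        have := agFind_set_count_self hfind
        simp [hinv c']
        omega
      · simp [hc, agFind_set_count_ne hfind hc, hinv c']

-- the initial counter of s2 counts each character's occurrences in s2
lemma init_counter (s2 : List Char) (c : Char) :
    (s2.foldl (fun d c => d.insert c (d.getD c 0 + 1)) PySem.Dict.empty).getD c 0
      = ((s2.map (fun c => some c)).count (some c) : Int) := by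
  rw [PySem.Dict.foldl_insert_getD_add_one_eq_counter, PySem.Dict.getD_counter,
    List.count_map_of_injective _ _ (fun _ _ => by simp) c]

-- ===== VERDICT (by name: the statement is the Claim_ definition above) =====
theorem anagram_sol1_spec : Claim_equal_anagram_sol1 := by
  intro s1 s2 _
  unfold Spec_anagram_sol1 anagram_sol1 anagram_sol1_alt
  exact agLoop_eq_bLoop _ _ _ (init_counter s2.toList)
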